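-- pv_equiv track=rewrite | github.com/stevenwtolbert/erdos-710-analysis | experiments/graph_theoretic/hpc_z44_mult_energy.py | additive_energy
-- ===== SOURCE A (Python) =====
-- from collections import defaultdict, Counter
--
-- def additive_energy(T):
--     """Compute E_add(T) = |{(a,b,c,d) ∈ T⁴ : a+b = c+d}|."""
--     sum_count = Counter()
--     n = len(T)
--     for i in range(n):
--         for j in range(n):
--             sum_count[T[i] + T[j]] += 1
--     E_add = sum(r * r for r in sum_count.values())
--     return E_add
-- ===== SOURCE B (Python) =====
-- def additive_energy(T):
--     """Compute E_add(T) = |{(a,b,c,d) in T^4 : a+b = c+d}|."""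
--     sums = [x + y for x in T for y in T]
--     sums.sort()
--     total = 0
--     run = 0
--     prev = None
--     for s in sums:
--         if run and s == prev:
--             run += 1
--         else:
--             total += run * run
--             run = 1
--             prev = s
--     total += run * run
--     return total
-- ===== Notes on version B (the rewrite author's own statement) =====
-- stated objective: alternative
-- what changed: Replaces the Counter/hash aggregation of pair-sums by building the flat list of all n^2 pair-sums, sorting it, and summing run_length^2 over maximal runs of equal values in one linear pass.
import Mathlib
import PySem

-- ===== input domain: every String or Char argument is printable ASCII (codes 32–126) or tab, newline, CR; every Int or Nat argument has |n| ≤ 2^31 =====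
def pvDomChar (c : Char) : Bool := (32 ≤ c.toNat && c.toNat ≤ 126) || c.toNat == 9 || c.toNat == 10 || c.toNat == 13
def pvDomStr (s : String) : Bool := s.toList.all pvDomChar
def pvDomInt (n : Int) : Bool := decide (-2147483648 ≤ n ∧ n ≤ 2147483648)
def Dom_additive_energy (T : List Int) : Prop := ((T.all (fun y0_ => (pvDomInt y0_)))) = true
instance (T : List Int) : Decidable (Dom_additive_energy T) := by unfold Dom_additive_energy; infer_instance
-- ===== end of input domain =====

-- B replaces A's Counter/hash aggregation of the n^2 pair-sums by sort-then-run-length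
-- counting (sum of run_length^2 over maximal runs); alternative decomposition, not faster.

-- ===== PORT A =====
def additive_energy (T : List Int) : Int :=
  let n : Int := PySem.List.len T
  let sum_count : PySem.Dict Int Int :=
    (PySem.List.pyRange 0 n 1).foldl (fun d i =>
      (PySem.List.pyRange 0 n 1).foldl (fun d j =>
        d.modify (PySem.List.pyGetD T i 0 + PySem.List.pyGetD T j 0) 0 (· + 1)) d)
      PySem.Dict.empty
  ((sum_count.values).map (fun r => r * r)).sum

-- ===== PORT B =====
def additive_energy_alt (T : List Int) : Int :=
  let sums : List Int := T.flatMap (fun x => T.map (fun y => x + y))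
  let ss : List Int := PySem.List.sorted sums (fun z => z) false
  let st : Int × Int × Int :=
    ss.foldl (fun (acc : Int × Int × Int) s =>
      let total := acc.1; let run := acc.2.1; let prev := acc.2.2
      if run ≠ 0 ∧ s = prev then (total, run + 1, prev)
      else (total + run * run, 1, s)) (0, 0, 0)
  st.1 + st.2.1 * st.2.1

-- ===== PRECONDITION & SPEC =====
def Spec_additive_energy (T : List Int) (out : Int) : Prop := out = additive_energy_alt T
instance (T : List Int) (out : Int) : Decidable (Spec_additive_energy T out) := by unfold Spec_additive_energy; infer_instance

-- ===== CLAIM (what is proved, stated in full; the proofs are below) =====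
def Claim_equal_additive_energy : Prop := ∀ (T : List Int), Dom_additive_energy T → Spec_additive_energy T (additive_energy T)

-- ===== LEMMAS AND PROOFS =====

-- recursive description of the run-length pass: the value added to `total` by
-- the remaining list plus the final flush, given current run length r of value p
def runEnergy : List Int → Int → Int → Int
  | [], r, _ => r * r
  | s :: tl, r, p => if r ≠ 0 ∧ s = p then runEnergy tl (r + 1) p
                     else r * r + runEnergy tl 1 s

theorem foldl_runEnergy (ys : List Int) : ∀ (t r p : Int),
    (ys.foldl (fun (acc : Int × Int × Int) s =>
      let total := acc.1; let run := acc.2.1; let prev := acc.2.2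
      if run ≠ 0 ∧ s = prev then (total, run + 1, prev)
      else (total + run * run, 1, s)) (t, r, p)).1 +
    (ys.foldl (fun (acc : Int × Int × Int) s =>
      let total := acc.1; let run := acc.2.1; let prev := acc.2.2
      if run ≠ 0 ∧ s = prev then (total, run + 1, prev)
      else (total + run * run, 1, s)) (t, r, p)).2.1 *
    (ys.foldl (fun (acc : Int × Int × Int) s =>
      let total := acc.1; let run := acc.2.1; let prev := acc.2.2
      if run ≠ 0 ∧ s = prev then (total, run + 1, prev)
      else (total + run * run, 1, s)) (t, r, p)).2.1 = t + runEnergy ys r p := by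
  induction ys with
  | nil => intro t r p; simp [runEnergy]
  | cons s tl ih =>
    intro t r p
    by_cases h : r ≠ 0 ∧ s = p
    · simp only [List.foldl_cons, runEnergy, if_pos h]
      exact ih t (r + 1) p
    · simp only [List.foldl_cons, runEnergy, if_neg h]
      rw [ih (t + r * r) 1 s]; ring

-- on a sorted suffix whose elements are all ≥ p, with a live run of length r ≥ 1 of value p
theorem runEnergy_sorted (ys : List Int) : ∀ (r p : Int), 1 ≤ r →
    ys.Pairwise (· ≤ ·) → (∀ y ∈ ys, p ≤ y) →
    runEnergy ys r p = (r + ys.count p) * (r + ys.count p) +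
      ∑ k ∈ ys.toFinset.erase p, (ys.count k : Int) * (ys.count k : Int) := by
  induction ys with
  | nil => intro r p _ _ _; simp [runEnergy]
  | cons s tl ih =>
    intro r p hr hs hall
    obtain ⟨hstl, htl⟩ := List.pairwise_cons.mp hs
    by_cases hsp : s = p
    · subst hsp
      have hcond : r ≠ 0 ∧ s = s := ⟨by omega, rfl⟩
      rw [runEnergy, if_pos hcond,
        ih (r + 1) s (by omega) htl (fun y hy => hstl y hy)]
      rw [List.count_cons_self, List.toFinset_cons, Finset.erase_insert_eq_erase]
      have hsum : ∀ k ∈ tl.toFinset.erase s,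
          (tl.count k : Int) * tl.count k = ((s :: tl).count k : Int) * (s :: tl).count k := by
        intro k hk
        have hne : ¬ s = k := fun h => Finset.ne_of_mem_erase hk h.symm
        simp [hne]
      rw [Finset.sum_congr rfl hsum]
      push_cast
      ring_nf
    · have hps : p < s := lt_of_le_of_ne (hall s (by simp)) (fun h => hsp h.symm)
      have hpmem : p ∉ s :: tl := by
        intro hmem
        rcases List.mem_cons.mp hmem with h | h
        · exact hsp h.symm
        · exact absurd (hstl p h) (by omega)
      have hcond : ¬ (r ≠ 0 ∧ s = p) := fun h => hsp h.2
      rw [runEnergy, if_neg hcond,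
        ih 1 s (le_refl 1) htl (fun y hy => hstl y hy)]
      rw [List.count_eq_zero.mpr hpmem,
        Finset.erase_eq_self.mpr (fun h => hpmem (List.mem_toFinset.mp h))]
      have hsmem : s ∈ (s :: tl).toFinset := by simp
      rw [← Finset.add_sum_erase _ _ hsmem]
      have herase : (s :: tl).toFinset.erase s = tl.toFinset.erase s := by
        rw [List.toFinset_cons, Finset.erase_insert_eq_erase]
      have hsum : ∀ k ∈ tl.toFinset.erase s,
          (tl.count k : Int) * tl.count k = ((s :: tl).count k : Int) * (s :: tl).count k := by
        intro k hk
        have hne : ¬ s = k := fun h => Finset.ne_of_mem_erase hk h.symm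
        simp [hne]
      rw [herase, Finset.sum_congr rfl hsum, List.count_cons_self]
      push_cast
      ring_nf

theorem runEnergy_start (ys : List Int) (p : Int) (hs : ys.Pairwise (· ≤ ·)) :
    runEnergy ys 0 p = ∑ k ∈ ys.toFinset, (ys.count k : Int) * (ys.count k : Int) := by
  cases ys with
  | nil => simp [runEnergy]
  | cons s tl =>
    obtain ⟨hstl, htl⟩ := List.pairwise_cons.mp hs
    have hcond : ¬ ((0 : Int) ≠ 0 ∧ s = p) := fun h => h.1 rfl
    rw [runEnergy, if_neg hcond,
      runEnergy_sorted tl 1 s (le_refl 1) htl (fun y hy => hstl y hy)]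
    have hsmem : s ∈ (s :: tl).toFinset := by simp
    rw [← Finset.add_sum_erase _ _ hsmem]
    have herase : (s :: tl).toFinset.erase s = tl.toFinset.erase s := by
      rw [List.toFinset_cons, Finset.erase_insert_eq_erase]
    have hsum : ∀ k ∈ tl.toFinset.erase s,
        (tl.count k : Int) * tl.count k = ((s :: tl).count k : Int) * (s :: tl).count k := by
      intro k hk
      have hne : ¬ s = k := fun h => Finset.ne_of_mem_erase hk h.symm
      simp [hne]
    rw [herase, Finset.sum_congr rfl hsum, List.count_cons_self]
    push_cast
    ring_nf

theorem counter_values_sum (S : List Int) :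
    (((PySem.Dict.counter S).values).map (fun r => r * r)).sum =
      ∑ k ∈ S.toFinset, (S.count k : Int) * (S.count k : Int) := by
  have hval : (PySem.Dict.counter S).values
      = (PySem.Set.ofList S).map (fun k => (S.count k : Int)) := by
    show ((PySem.Dict.counter S).items).map Prod.snd = _
    rw [PySem.Dict.items_counter]
    simp [List.map_map, Function.comp]
  rw [hval, List.map_map]
  have hnd : (PySem.Set.ofList S).Nodup := PySem.Set.nodup_ofList S
  have htf : (PySem.Set.ofList S).toFinset = S.toFinset := by
    ext k; simp [PySem.Set.mem_ofList]
  rw [← htf, List.sum_toFinset _ hnd]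
  rfl

-- ===== VERDICT (by name: the statement is the Claim_ definition above) =====
theorem additive_energy_spec : Claim_equal_additive_energy := by
  intro T _
  show additive_energy T = additive_energy_alt T
  simp only [additive_energy, additive_energy_alt]
  -- A side: the nested index loops build Counter(S) for S the flat pair-sum list
  have hA : (PySem.List.pyRange 0 (PySem.List.len T) 1).foldl (fun d i =>
      (PySem.List.pyRange 0 (PySem.List.len T) 1).foldl (fun d j =>
        PySem.Dict.modify d (PySem.List.pyGetD T i 0 + PySem.List.pyGetD T j 0) 0 (· + 1)) d)
      PySem.Dict.empty
      = PySem.Dict.counter (T.flatMap (fun x => T.map (fun y => x + y))) := by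
    rw [PySem.List.foldl_pyRange_zero_pyGetD T 0
      (fun d x => (PySem.List.pyRange 0 (PySem.List.len T) 1).foldl (fun d j =>
        PySem.Dict.modify d (x + PySem.List.pyGetD T j 0) 0 (· + 1)) d) PySem.Dict.empty]
    have hin : ∀ (a : PySem.Dict Int Int) (x : Int),
        (PySem.List.pyRange 0 (PySem.List.len T) 1).foldl (fun d j =>
          PySem.Dict.modify d (x + PySem.List.pyGetD T j 0) 0 (· + 1)) a
        = (T.map (fun y => x + y)).foldl (fun d s => PySem.Dict.modify d s 0 (· + 1)) a := by
      intro a x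
      rw [PySem.List.foldl_pyRange_zero_pyGetD T 0
        (fun d y => PySem.Dict.modify d (x + y) 0 (· + 1)) a, List.foldl_map]
    rw [PySem.Dict.counter_eq_foldl, List.foldl_flatMap]
    exact PySem.List.foldl_congr_mem T _ _ PySem.Dict.empty (fun a x _ => hin a x)
  rw [hA, counter_values_sum]
  -- B side: sort then run-length
  have hsorted := PySem.List.sorted_pairwise (T.flatMap (fun x => T.map (fun y => x + y))) (fun z => z)
  have hperm : (PySem.List.sorted (T.flatMap (fun x => T.map (fun y => x + y))) (fun z => z) false).Perm
      (T.flatMap (fun x => T.map (fun y => x + y))) :=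
    PySem.List.sorted_perm (T.flatMap (fun x => T.map (fun y => x + y))) (fun z => z) false
  rw [foldl_runEnergy, runEnergy_start _ 0 hsorted]
  have htf : (PySem.List.sorted (T.flatMap (fun x => T.map (fun y => x + y))) (fun z => z) false).toFinset
      = (T.flatMap (fun x => T.map (fun y => x + y))).toFinset := by
    ext k; simp [hperm.mem_iff]
  rw [htf, zero_add]
  refine Finset.sum_congr rfl (fun k _ => ?_)
  rw [hperm.count_eq]
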